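-- pv_equiv track=rewrite | github.com/Hackintosh1980/Vivosun-Dashboard | widgets/growhub_csv_viewer.py | _find_time_col
-- ===== SOURCE A (Python) =====
-- def _find_time_col(cols):
--     candidates = []
--     for c in cols:
--         lc = str(c).lower().strip()
--         if ("timestamp" in lc) or ("time" in lc) or ("date" in lc):
--             prio = 0 if "timestamp" in lc else 1
--             candidates.append((prio, len(lc), c))
--     if not candidates:
--         return None
--     candidates.sort()
--     return candidates[0][2]
-- ===== SOURCE B (Python) =====
-- def _find_time_col(cols):
--     # One pass, two running minima (timestamp-priority and time/date-priority),
--     # instead of building and sorting a priority-tagged candidate list.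
--     best_ts = None
--     best_td = None
--     for c in cols:
--         lc = str(c).lower().strip()
--         key = (len(lc), c)
--         if "timestamp" in lc:
--             if best_ts is None or key < best_ts:
--                 best_ts = key
--         elif ("time" in lc) or ("date" in lc):
--             if best_td is None or key < best_td:
--                 best_td = key
--     if best_ts is not None:
--         return best_ts[1]
--     if best_td is not None:
--         return best_td[1]
--     return None
-- ===== Notes on version B (the rewrite author's own statement) =====
-- stated objective: alternative
-- what changed: Replaces the build-candidate-list-then-sort approach by a single pass that keeps two running minima (one for 'timestamp' columns, one for 'time'/'date' columns) under the same (len, value) tie-break, returning the timestamp minimum if any, else the time/date minimum.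
import Mathlib
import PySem

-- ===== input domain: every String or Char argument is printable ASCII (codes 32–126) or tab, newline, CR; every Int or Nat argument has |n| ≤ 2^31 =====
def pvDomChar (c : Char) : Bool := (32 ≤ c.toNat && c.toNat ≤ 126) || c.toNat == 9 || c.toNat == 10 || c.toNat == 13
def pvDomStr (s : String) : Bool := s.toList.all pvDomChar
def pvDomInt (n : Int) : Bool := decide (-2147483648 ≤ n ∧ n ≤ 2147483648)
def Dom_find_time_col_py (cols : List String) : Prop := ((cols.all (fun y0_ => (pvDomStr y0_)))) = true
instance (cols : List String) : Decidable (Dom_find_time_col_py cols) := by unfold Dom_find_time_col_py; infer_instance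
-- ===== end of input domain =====

-- B replaces A's build-then-sort of a priority-tagged candidate list by a single pass keeping
-- two running minima (timestamp matches and time/date matches) under the same (len, value)
-- tie-break; objective: alternative decomposition.

-- ===== PORT A =====
-- A builds (prio, len(lc), c) tuples, sorts them and returns the first tuple's column.
-- Python's lexicographic tuple order is modelled by the Lex product order Int ×ₗ (Int ×ₗ String).
def find_time_col_py (cols : List String) : Option String :=
  let candidates : List (Int ×ₗ (Int ×ₗ String)) :=
    cols.foldl (fun acc c =>
      let lc := PySem.Str.strip (PySem.Str.lower c)
      if PySem.Str.isIn "timestamp" lc || PySem.Str.isIn "time" lc || PySem.Str.isIn "date" lc then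
        acc ++ [toLex ((if PySem.Str.isIn "timestamp" lc then (0 : Int) else 1),
                        toLex (PySem.Str.len lc, c))]
      else acc) []
  if candidates = [] then none
  else
    match PySem.List.sorted candidates (fun x => x) false with
    | [] => none
    | m :: _ => some (ofLex (ofLex m).2).2

-- ===== PORT B =====
def find_time_col_py_alt (cols : List String) : Option String :=
  let st :=
    cols.foldl (fun (st : Option (Int × String) × Option (Int × String)) c =>
      let lc := PySem.Str.strip (PySem.Str.lower c)
      let key : Int × String := (PySem.Str.len lc, c)
      if PySem.Str.isIn "timestamp" lc then
        match st.1 with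
        | none => (some key, st.2)
        | some b => if key.1 < b.1 ∨ (key.1 = b.1 ∧ key.2 < b.2) then (some key, st.2) else st
      else if PySem.Str.isIn "time" lc || PySem.Str.isIn "date" lc then
        match st.2 with
        | none => (st.1, some key)
        | some b => if key.1 < b.1 ∨ (key.1 = b.1 ∧ key.2 < b.2) then (st.1, some key) else st
      else st) (none, none)
  match st.1 with
  | some b => some b.2
  | none =>
    match st.2 with
    | some b => some b.2
    | none => none


-- ===== PRECONDITION & SPEC =====
def Spec_find_time_col_py (cols : List String) (out : Option String) : Prop := out = find_time_col_py_alt cols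
instance (cols : List String) (out : Option String) : Decidable (Spec_find_time_col_py cols out) := by unfold Spec_find_time_col_py; infer_instance

-- ===== CLAIM (what is proved, stated in full; the proofs are below) =====
def Claim_equal_find_time_col_py : Prop := ∀ (cols : List String), Dom_find_time_col_py cols → Spec_find_time_col_py cols (find_time_col_py cols)

-- ===== LEMMAS AND PROOFS =====

def pvLC (c : String) : String := PySem.Str.strip (PySem.Str.lower c)
def pvTS (c : String) : Bool := PySem.Str.isIn "timestamp" (pvLC c)
def pvTD (c : String) : Bool := PySem.Str.isIn "time" (pvLC c) || PySem.Str.isIn "date" (pvLC c)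
def pvKey (c : String) : Int × String := (PySem.Str.len (pvLC c), c)
def pvUpd (s : Option (Int × String)) (k : Int × String) : Option (Int × String) :=
  match s with
  | none => some k
  | some b => if k.1 < b.1 ∨ (k.1 = b.1 ∧ k.2 < b.2) then some k else some b

lemma stepB_eq (s : Option (Int × String) × Option (Int × String)) (c : String) :
    (if PySem.Str.isIn "timestamp" (PySem.Str.strip (PySem.Str.lower c)) then
        match s.1 with
        | none => (some (PySem.Str.len (PySem.Str.strip (PySem.Str.lower c)), c), s.2)
        | some b => if PySem.Str.len (PySem.Str.strip (PySem.Str.lower c)) < b.1 ∨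
              (PySem.Str.len (PySem.Str.strip (PySem.Str.lower c)) = b.1 ∧ c < b.2) then
            (some (PySem.Str.len (PySem.Str.strip (PySem.Str.lower c)), c), s.2) else s
      else if PySem.Str.isIn "time" (PySem.Str.strip (PySem.Str.lower c)) ||
            PySem.Str.isIn "date" (PySem.Str.strip (PySem.Str.lower c)) then
        match s.2 with
        | none => (s.1, some (PySem.Str.len (PySem.Str.strip (PySem.Str.lower c)), c))
        | some b => if PySem.Str.len (PySem.Str.strip (PySem.Str.lower c)) < b.1 ∨
              (PySem.Str.len (PySem.Str.strip (PySem.Str.lower c)) = b.1 ∧ c < b.2) then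
            (s.1, some (PySem.Str.len (PySem.Str.strip (PySem.Str.lower c)), c)) else s
      else s)
    = (if pvTS c then pvUpd s.1 (pvKey c) else s.1,
       if !pvTS c && pvTD c then pvUpd s.2 (pvKey c) else s.2) := by
  obtain ⟨s1, s2⟩ := s
  by_cases hts : pvTS c
  · have h1 : PySem.Str.isIn "timestamp" (PySem.Str.strip (PySem.Str.lower c)) = true := hts
    rw [if_pos h1]
    simp only [hts, Bool.not_true, Bool.false_and, if_true, Bool.false_eq_true, if_false]
    cases s1 with
    | none => rfl
    | some b =>
      dsimp only [pvUpd, pvKey, pvLC]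
      split_ifs <;> rfl
  · have h1 : PySem.Str.isIn "timestamp" (PySem.Str.strip (PySem.Str.lower c)) = false := by
      simpa [pvTS, pvLC] using hts
    rw [if_neg (by simpa using h1)]
    simp only [hts, Bool.not_false, Bool.true_and, Bool.false_eq_true, if_false]
    by_cases htd : pvTD c
    · have h2 : (PySem.Str.isIn "time" (PySem.Str.strip (PySem.Str.lower c)) ||
          PySem.Str.isIn "date" (PySem.Str.strip (PySem.Str.lower c))) = true := htd
      rw [if_pos h2]
      simp only [htd, if_true]
      cases s2 with
      | none => rfl
      | some b =>
        dsimp only [pvUpd, pvKey, pvLC]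
        split_ifs <;> rfl
    · have h2 : (PySem.Str.isIn "time" (PySem.Str.strip (PySem.Str.lower c)) ||
          PySem.Str.isIn "date" (PySem.Str.strip (PySem.Str.lower c))) = false := by
        simpa [pvTD, pvLC] using htd
      rw [if_neg (by simpa using h2)]
      simp only [htd, Bool.false_eq_true, if_false]

lemma foldB (cols : List String) (s : Option (Int × String) × Option (Int × String)) :
    cols.foldl (fun (st : Option (Int × String) × Option (Int × String)) c =>
      if PySem.Str.isIn "timestamp" (PySem.Str.strip (PySem.Str.lower c)) then
        match st.1 with
        | none => (some (PySem.Str.len (PySem.Str.strip (PySem.Str.lower c)), c), st.2)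
        | some b => if PySem.Str.len (PySem.Str.strip (PySem.Str.lower c)) < b.1 ∨
              (PySem.Str.len (PySem.Str.strip (PySem.Str.lower c)) = b.1 ∧ c < b.2) then
            (some (PySem.Str.len (PySem.Str.strip (PySem.Str.lower c)), c), st.2) else st
      else if PySem.Str.isIn "time" (PySem.Str.strip (PySem.Str.lower c)) ||
            PySem.Str.isIn "date" (PySem.Str.strip (PySem.Str.lower c)) then
        match st.2 with
        | none => (st.1, some (PySem.Str.len (PySem.Str.strip (PySem.Str.lower c)), c))
        | some b => if PySem.Str.len (PySem.Str.strip (PySem.Str.lower c)) < b.1 ∨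
              (PySem.Str.len (PySem.Str.strip (PySem.Str.lower c)) = b.1 ∧ c < b.2) then
            (st.1, some (PySem.Str.len (PySem.Str.strip (PySem.Str.lower c)), c)) else st
      else st) s
    = (((cols.filter pvTS).map pvKey).foldl pvUpd s.1,
       ((cols.filter (fun c => !pvTS c && pvTD c)).map pvKey).foldl pvUpd s.2) := by
  induction cols generalizing s with
  | nil => simp
  | cons c t ih =>
    rw [List.foldl_cons, ih]
    rw [stepB_eq]
    simp only [List.filter_cons]
    by_cases hts : pvTS c <;> by_cases htd : pvTD c <;>
      simp [hts, htd]

def pvTag (c : String) : Int ×ₗ (Int ×ₗ String) :=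
  toLex ((if pvTS c then (0 : Int) else 1), toLex (pvKey c))

lemma pvUpd_lt (b k : Int × String) :
    pvUpd (some b) k = if toLex k < toLex b then some k else some b := by
  simp only [pvUpd, Prod.Lex.lt_iff, ofLex_toLex]

lemma foldUpd_some (ks : List (Int × String)) (b : Int × String) :
    ∃ m, ks.foldl pvUpd (some b) = some m ∧ (m = b ∨ m ∈ ks) ∧ toLex m ≤ toLex b ∧
      ∀ y ∈ ks, toLex m ≤ toLex y := by
  induction ks generalizing b with
  | nil => exact ⟨b, rfl, Or.inl rfl, le_refl _, by simp⟩
  | cons k t ih =>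
    rw [List.foldl_cons, pvUpd_lt]
    by_cases hlt : toLex k < toLex b
    · rw [if_pos hlt]
      obtain ⟨m, hm, hmem, hle, hall⟩ := ih k
      refine ⟨m, hm, ?_, le_of_lt (lt_of_le_of_lt hle hlt), ?_⟩
      · rcases hmem with h | h
        · exact Or.inr (by simp [h])
        · exact Or.inr (by simp [h])
      · intro y hy
        rcases List.mem_cons.mp hy with h | h
        · exact h ▸ hle
        · exact hall y h
    · rw [if_neg hlt]
      obtain ⟨m, hm, hmem, hle, hall⟩ := ih b
      refine ⟨m, hm, ?_, hle, ?_⟩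
      · rcases hmem with h | h
        · exact Or.inl h
        · exact Or.inr (by simp [h])
      · intro y hy
        rcases List.mem_cons.mp hy with h | h
        · exact h ▸ le_trans hle (le_of_not_gt hlt)
        · exact hall y h

lemma foldUpd_nil_iff (ks : List (Int × String)) :
    ks.foldl pvUpd none = none ↔ ks = [] := by
  cases ks with
  | nil => simp
  | cons k t =>
    simp only [List.foldl_cons, List.cons_ne_nil, iff_false]
    obtain ⟨m, hm, _⟩ := foldUpd_some t k
    simp [pvUpd, hm]

lemma foldUpd_min (ks : List (Int × String)) (m : Int × String)
    (h : ks.foldl pvUpd none = some m) : m ∈ ks ∧ ∀ y ∈ ks, toLex m ≤ toLex y := by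
  cases ks with
  | nil => simp at h
  | cons k t =>
    rw [List.foldl_cons] at h
    obtain ⟨m', hm', hmem, hle, hall⟩ := foldUpd_some t k
    rw [show pvUpd none k = some k from rfl] at h
    rw [hm'] at h
    obtain rfl : m' = m := by injection h
    refine ⟨?_, ?_⟩
    · rcases hmem with h | h
      · simp [h]
      · simp [h]
    · intro y hy
      rcases List.mem_cons.mp hy with h | h
      · exact h ▸ hle
      · exact hall y h


lemma candA (cols : List String) (acc : List (Int ×ₗ (Int ×ₗ String))) :
    cols.foldl (fun acc c =>
      if PySem.Str.isIn "timestamp" (PySem.Str.strip (PySem.Str.lower c)) ||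
          PySem.Str.isIn "time" (PySem.Str.strip (PySem.Str.lower c)) ||
          PySem.Str.isIn "date" (PySem.Str.strip (PySem.Str.lower c)) then
        acc ++ [toLex ((if PySem.Str.isIn "timestamp" (PySem.Str.strip (PySem.Str.lower c)) then (0 : Int) else 1),
                        toLex (PySem.Str.len (PySem.Str.strip (PySem.Str.lower c)), c))]
      else acc) acc
    = acc ++ (cols.filter (fun c => pvTS c || pvTD c)).map pvTag := by
  induction cols generalizing acc with
  | nil => simp
  | cons c t ih =>
    simp only [List.foldl_cons, List.filter_cons]
    rw [ih]
    by_cases hts : pvTS c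
    · have h1 : PySem.Str.isIn "timestamp" (PySem.Str.strip (PySem.Str.lower c)) = true := hts
      simp only [h1, hts, Bool.true_or, if_true, List.map_cons, List.append_assoc,
        List.singleton_append]
      simp [pvTag, pvKey, pvLC, hts]
    · have h1 : PySem.Str.isIn "timestamp" (PySem.Str.strip (PySem.Str.lower c)) = false := by
        simpa [pvTS, pvLC] using hts
      by_cases htd : pvTD c
      · have h2 : (PySem.Str.isIn "time" (PySem.Str.strip (PySem.Str.lower c)) ||
            PySem.Str.isIn "date" (PySem.Str.strip (PySem.Str.lower c))) = true := htd
        simp only [h1, htd, Bool.false_eq_true, if_false, Bool.false_or]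
        simp [pvTag, pvKey, pvLC, hts, Bool.false_eq_true]
        rw [if_pos (by simpa using h2)]
        simp
      · have h2 : (PySem.Str.isIn "time" (PySem.Str.strip (PySem.Str.lower c)) ||
            PySem.Str.isIn "date" (PySem.Str.strip (PySem.Str.lower c))) = false := by
          simpa [pvTD, pvLC] using htd
        have h3 : (PySem.Str.isIn "timestamp" (PySem.Str.strip (PySem.Str.lower c)) ||
            PySem.Str.isIn "time" (PySem.Str.strip (PySem.Str.lower c)) ||
            PySem.Str.isIn "date" (PySem.Str.strip (PySem.Str.lower c))) = false := by
          simp only [h1, Bool.false_or]; exact h2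
        have h2' := Bool.or_eq_false_iff.mp h2
        simp [hts, htd, Bool.false_eq_true]
        exact ⟨⟨by simpa using h1, by simpa using h2'.1⟩, by simpa using h2'.2⟩

lemma tag_third (c : String) : (ofLex (ofLex (pvTag c)).2).2 = c := by
  simp only [pvTag, ofLex_toLex]
  rfl

lemma tag_le_tag_of_inner {c0 c1 : String} (h0 : pvTS c0 = pvTS c1)
    (hk : toLex (pvKey c0) ≤ toLex (pvKey c1)) : pvTag c0 ≤ pvTag c1 := by
  simp only [pvTag, h0]
  rw [Prod.Lex.le_iff]
  right
  simp only [ofLex_toLex]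
  exact ⟨trivial, hk⟩

lemma tag_le_tag_of_prio {c0 c1 : String} (h0 : pvTS c0 = true) (h1 : pvTS c1 = false) :
    pvTag c0 ≤ pvTag c1 := by
  simp only [pvTag, h0, h1, if_true, Bool.false_eq_true, if_false]
  rw [Prod.Lex.le_iff]
  left
  simp only [ofLex_toLex]
  norm_num

theorem find_time_col_eq (cols : List String) : find_time_col_py cols = find_time_col_py_alt cols := by
  unfold find_time_col_py find_time_col_py_alt
  dsimp only
  rw [candA cols [], List.nil_append, foldB cols (none, none)]
  by_cases hL : cols.filter (fun c => pvTS c || pvTD c) = []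
  · have hts : cols.filter pvTS = [] := by
      rw [List.filter_eq_nil_iff] at hL ⊢
      intro a ha h
      exact hL a ha (by simp [h])
    have htd : cols.filter (fun c => !pvTS c && pvTD c) = [] := by
      rw [List.filter_eq_nil_iff] at hL ⊢
      intro a ha h
      rcases Bool.and_eq_true_iff.mp h with ⟨_, h2⟩
      exact hL a ha (by simp [h2])
    rw [hL, hts, htd]
    simp
  · rw [if_neg (by simpa [List.map_eq_nil_iff] using hL)]
    cases hs : PySem.List.sorted ((cols.filter (fun c => pvTS c || pvTD c)).map pvTag)
        (fun x => x) false with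
    | nil =>
      exact absurd (by simpa [List.map_eq_nil_iff] using
        (PySem.List.sorted_eq_nil_iff _ _ _).mp hs) hL
    | cons m tl =>
      have hmin : ∀ y ∈ (cols.filter (fun c => pvTS c || pvTD c)).map pvTag, m ≤ y :=
        PySem.List.key_head_sorted_le _ (fun x => x) hs
      have hmem : m ∈ (cols.filter (fun c => pvTS c || pvTD c)).map pvTag := by
        have h : m ∈ PySem.List.sorted ((cols.filter (fun c => pvTS c || pvTD c)).map pvTag)
            (fun x => x) false := by rw [hs]; exact List.mem_cons_self
        exact (PySem.List.mem_sorted _ _ _ _).mp h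
      obtain ⟨c1, hc1L, hc1⟩ := List.mem_map.mp hmem
      obtain ⟨hc1cols, hc1p⟩ := List.mem_filter.mp hc1L
      by_cases hKts : cols.filter pvTS = []
      · -- no timestamp column: B's first accumulator stays none
        have hTSfalse : ∀ a ∈ cols, pvTS a = false := by
          rw [List.filter_eq_nil_iff] at hKts
          intro a ha
          exact Bool.not_eq_true _ ▸ by simpa using hKts a ha
        have hne : cols.filter (fun c => !pvTS c && pvTD c) ≠ [] := by
          intro hnil
          rw [List.filter_eq_nil_iff] at hnil
          refine hnil c1 hc1cols ?_
          have h1 := hTSfalse c1 hc1cols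
          have h2 : pvTD c1 = true := by
            rcases Bool.or_eq_true_iff.mp (by simpa using hc1p) with h | h
            · rw [h1] at h; cases h
            · exact h
          simp [h1, h2]
        rw [hKts]
        simp only [List.map_nil, List.foldl_nil]
        cases hm0 : ((cols.filter (fun c => !pvTS c && pvTD c)).map pvKey).foldl pvUpd none with
        | none =>
          exact absurd (by simpa [List.map_eq_nil_iff] using
            (foldUpd_nil_iff _).mp hm0) hne
        | some m0 =>
          obtain ⟨hm0mem, hm0min⟩ := foldUpd_min _ _ hm0
          obtain ⟨c0, hc0F, hc0⟩ := List.mem_map.mp hm0mem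
          obtain ⟨hc0cols, hc0p⟩ := List.mem_filter.mp hc0F
          have hc0ts : pvTS c0 = false := hTSfalse c0 hc0cols
          have le1 : m ≤ pvTag c0 := by
            refine hmin _ (List.mem_map_of_mem ?_)
            refine List.mem_filter.mpr ⟨hc0cols, ?_⟩
            rcases Bool.and_eq_true_iff.mp hc0p with ⟨_, h2⟩
            simp [h2]
          have le2 : pvTag c0 ≤ m := by
            rw [← hc1]
            have hc1ts : pvTS c1 = false := hTSfalse c1 hc1cols
            refine tag_le_tag_of_inner (by rw [hc0ts, hc1ts]) ?_
            have hc1F : c1 ∈ cols.filter (fun c => !pvTS c && pvTD c) := by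
              refine List.mem_filter.mpr ⟨hc1cols, ?_⟩
              have h2 : pvTD c1 = true := by
                rcases Bool.or_eq_true_iff.mp (by simpa using hc1p) with h | h
                · rw [hc1ts] at h; cases h
                · exact h
              simp [hc1ts, h2]
            have := hm0min _ (List.mem_map_of_mem hc1F)
            rw [hc0]
            exact this
          have hmeq : m = pvTag c0 := le_antisymm le1 le2
          have hm02 : m0.2 = c0 := by rw [← hc0]; rfl
          dsimp only
          rw [hmeq, tag_third, hm02]
      · -- some timestamp column: B answers from the first accumulator
        cases hm0 : ((cols.filter pvTS).map pvKey).foldl pvUpd none with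
        | none =>
          exact absurd (by simpa [List.map_eq_nil_iff] using
            (foldUpd_nil_iff _).mp hm0) hKts
        | some m0 =>
          obtain ⟨hm0mem, hm0min⟩ := foldUpd_min _ _ hm0
          obtain ⟨c0, hc0F, hc0⟩ := List.mem_map.mp hm0mem
          obtain ⟨hc0cols, hc0ts⟩ := List.mem_filter.mp hc0F
          have le1 : m ≤ pvTag c0 := by
            refine hmin _ (List.mem_map_of_mem ?_)
            exact List.mem_filter.mpr ⟨hc0cols, by simp [hc0ts]⟩
          have le2 : pvTag c0 ≤ m := by
            rw [← hc1]
            by_cases hc1ts : pvTS c1 = true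
            · refine tag_le_tag_of_inner (by rw [hc0ts, hc1ts]) ?_
              have hc1F : c1 ∈ cols.filter pvTS := List.mem_filter.mpr ⟨hc1cols, hc1ts⟩
              have := hm0min _ (List.mem_map_of_mem hc1F)
              rw [hc0]
              exact this
            · exact tag_le_tag_of_prio hc0ts (Bool.not_eq_true _ ▸ by simpa using hc1ts)
          have hmeq : m = pvTag c0 := le_antisymm le1 le2
          have hm02 : m0.2 = c0 := by rw [← hc0]; rfl
          dsimp only
          rw [hmeq, tag_third, hm02]

-- ===== VERDICT (by name: the statement is the Claim_ definition above) =====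
theorem find_time_col_py_spec : Claim_equal_find_time_col_py := by
  intro cols _
  exact find_time_col_eq cols
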